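-- pv_equiv track=rewrite | github.com/ajskdlf64/MS-of-Data-Science-in-SKKU | Data Structure and Algorithm/Stack.py | MyFunction_02
-- ===== SOURCE A (Python) =====
-- def MyFunction_02(fomula):
--     fomula_len = 0
--     stack = []
--     yn = "OK"
--     for keyword in fomula:
--         if keyword in ['[', ']', '(', ')', '{', '}']:
--             fomula_len += 1
--         if keyword in ['[', '(', '{']:
--             stack.append(keyword)
--         elif keyword in [']', ')', '}']:
--             if len(stack) == 0:
--                 yn = 'Wrong'
--             else:
--                 left = stack.pop()
--                 if (keyword == ']') and (left != '[') or\
--                    (keyword == ')') and (left != '(') or\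
--                    (keyword == '}') and (left != '{'):
--                     yn = 'Wrong'
--     if len(stack) != 0:
--         yn = 'Wrong'
--     return yn +  '_' + str(fomula_len)
-- ===== SOURCE B (Python) =====
-- BRACKETS = {'[', ']', '(', ')', '{', '}'}
--
-- def MyFunction_02(fomula):
--     s = ''.join(c for c in fomula if c in BRACKETS)
--     fomula_len = len(s)
--     while True:
--         t = s.replace('()', '').replace('[]', '').replace('{}', '')
--         if t == s:
--             break
--         s = t
--     yn = 'OK' if s == '' else 'Wrong'
--     return yn + '_' + str(fomula_len)
-- ===== Notes on version B (the rewrite author's own statement) =====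
-- stated objective: alternative
-- what changed: Replaced the single-pass stack machine with an error flag by a filter-then-normalize approach: collect the bracket characters once (count = their number), then repeatedly delete adjacent matched pairs with str.replace until a fixpoint; the formula is balanced iff the fixpoint is empty.
import Mathlib
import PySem

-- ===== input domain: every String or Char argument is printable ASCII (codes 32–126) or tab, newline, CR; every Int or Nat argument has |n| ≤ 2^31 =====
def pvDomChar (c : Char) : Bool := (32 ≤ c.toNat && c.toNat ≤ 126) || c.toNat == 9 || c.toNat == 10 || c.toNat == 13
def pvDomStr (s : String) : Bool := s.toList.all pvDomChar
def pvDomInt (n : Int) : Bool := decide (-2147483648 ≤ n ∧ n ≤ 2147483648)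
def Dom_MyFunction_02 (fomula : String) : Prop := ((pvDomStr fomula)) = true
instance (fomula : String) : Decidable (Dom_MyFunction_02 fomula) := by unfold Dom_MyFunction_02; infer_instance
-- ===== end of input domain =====

-- B replaces A's one-pass stack machine by: filter the bracket characters (count them), then
-- repeatedly delete adjacent matched pairs via replace until a fixpoint; balanced iff empty.
-- Alternative decomposition, not claimed faster.

-- ===== PORT A =====
-- loop body of A: state (fomula_len, stack, yn), one character
def pvStepA (st : Int × List Char × String) (c : Char) : Int × List Char × String :=
  match st with
  | (n, stack, yn) =>
    let n := if c ∈ (['[', ']', '(', ')', '{', '}'] : List Char) then n + 1 else n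
    if c ∈ (['[', '(', '{'] : List Char) then (n, c :: stack, yn)
    else if c ∈ ([']', ')', '}'] : List Char) then
      match stack with
      | [] => (n, [], "Wrong")
      | left :: rest =>
        if (c == ']' && left != '[') || (c == ')' && left != '(') || (c == '}' && left != '{') then
          (n, rest, "Wrong")
        else (n, rest, yn)
    else (n, stack, yn)

def MyFunction_02 (fomula : String) : String :=
  let st := fomula.toList.foldl pvStepA (0, [], "OK")
  let yn := if st.2.1.length ≠ 0 then "Wrong" else st.2.2
  yn ++ "_" ++ PySem.Int.toStr st.1

-- ===== PORT B =====
def pvBRACKETS : List Char := ['[', ']', '(', ')', '{', '}']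

-- proof-side characterization of s.replace(ab, '') for a two-character pattern;
-- needed above the port because pvReduceB's termination proof cites pvStepRepl_lt_or_eq
def pvRepl (a b : Char) : List Char → List Char
  | c :: d :: t => if a == c && b == d then pvRepl a b t else c :: pvRepl a b (d :: t)
  | l => l

theorem pvRepl_go_eq (a b : Char) : ∀ (fuel : Nat) (l acc : List Char), l.length ≤ fuel →
    PySem.Chars.replace.go [a, b] [] fuel l acc = acc.reverse ++ pvRepl a b l := by
  intro fuel
  induction fuel with
  | zero =>
    intro l acc h
    have hl : l = [] := List.eq_nil_of_length_eq_zero (Nat.le_zero.mp h)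
    subst hl
    simp [PySem.Chars.replace.go, pvRepl]
  | succ n ih =>
    intro l acc h
    match l with
    | [] => simp [PySem.Chars.replace.go, pvRepl]
    | [c] =>
      cases n <;> simp [PySem.Chars.replace.go, pvRepl, List.isPrefixOf]
    | c :: d :: t =>
      by_cases h1 : a = c ∧ b = d
      · obtain ⟨rfl, rfl⟩ := h1
        have ht : t.length ≤ n := by simp at h; omega
        simp [PySem.Chars.replace.go, pvRepl, List.isPrefixOf, ih t acc ht]
      · have hcond : (a == c && b == d) = false := by
          rcases h1' : a == c with _ | _ <;> rcases h2' : b == d with _ | _ <;> simp_all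
        have ht : (d :: t).length ≤ n := by simp at h ⊢; omega
        simp [PySem.Chars.replace.go, pvRepl, List.isPrefixOf, hcond, ih (d :: t) (c :: acc) ht]

theorem replace_pair_eq (a b : Char) (s : List Char) :
    PySem.Chars.replace s [a, b] [] = pvRepl a b s := by
  simpa [PySem.Chars.replace] using pvRepl_go_eq a b s.length s [] (le_refl _)

theorem pvRepl_length_le (a b : Char) (l : List Char) : (pvRepl a b l).length ≤ l.length := by
  fun_induction pvRepl a b l with
  | case1 c d t hcd ih => simp only [List.length_cons]; omega
  | case2 c d t hcd ih => simp only [List.length_cons] at ih ⊢; omega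
  | case3 l hl => exact le_rfl

theorem pvRepl_eq_or_lt (a b : Char) (l : List Char) :
    pvRepl a b l = l ∨ (pvRepl a b l).length + 2 ≤ l.length := by
  fun_induction pvRepl a b l with
  | case1 c d t hcd ih =>
    right
    have := pvRepl_length_le a b t
    simp; omega
  | case2 c d t hcd ih =>
    rcases ih with h | h
    · left; simp [h]
    · right; simp at h ⊢; omega
  | case3 l h => left; rfl

-- one reduction step of B's while loop
def pvStepRepl (s : List Char) : List Char :=
  PySem.Chars.replace (PySem.Chars.replace (PySem.Chars.replace s ['(', ')'] []) ['[', ']'] []) ['{', '}'] []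

theorem pvStepRepl_lt_or_eq (s : List Char) :
    (pvStepRepl s).length < s.length ∨ pvStepRepl s = s := by
  unfold pvStepRepl
  rw [replace_pair_eq, replace_pair_eq, replace_pair_eq]
  rcases pvRepl_eq_or_lt '(' ')' s with h1 | h1
  · rw [h1]
    rcases pvRepl_eq_or_lt '[' ']' s with h2 | h2
    · rw [h2]
      rcases pvRepl_eq_or_lt '{' '}' s with h3 | h3
      · right; rw [h3]
      · left; omega
    · left
      have := pvRepl_length_le '{' '}' (pvRepl '[' ']' s)
      omega
  · left
    have h2 := pvRepl_length_le '[' ']' (pvRepl '(' ')' s)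
    have h3 := pvRepl_length_le '{' '}' (pvRepl '[' ']' (pvRepl '(' ')' s))
    omega

-- B's while loop: reduce until the replace pass changes nothing
def pvReduceB (s : List Char) : List Char :=
  if _h : pvStepRepl s = s then s else pvReduceB (pvStepRepl s)
termination_by s.length
decreasing_by
  rcases pvStepRepl_lt_or_eq s with hlt | heq
  · exact hlt
  · exact absurd heq _h

def MyFunction_02_alt (fomula : String) : String :=
  let s := fomula.toList.filter (fun c => decide (c ∈ pvBRACKETS))
  let n : Int := s.length
  let r := pvReduceB s
  let yn := if r = [] then "OK" else "Wrong"
  yn ++ "_" ++ PySem.Int.toStr n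

-- ===== PRECONDITION & SPEC =====
def Spec_MyFunction_02 (fomula : String) (out : String) : Prop := out = MyFunction_02_alt fomula
instance (fomula : String) (out : String) : Decidable (Spec_MyFunction_02 fomula out) := by unfold Spec_MyFunction_02; infer_instance

-- ===== CLAIM (what is proved, stated in full; the proofs are below) =====
def Claim_equal_MyFunction_02 : Prop := ∀ (fomula : String), Dom_MyFunction_02 fomula → Spec_MyFunction_02 fomula (MyFunction_02 fomula)

-- ===== LEMMAS AND PROOFS =====

-- A's machine without the counter: state (stack, yn)
def pvStep2 (st : List Char × String) (c : Char) : List Char × String :=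
  if c ∈ (['[', '(', '{'] : List Char) then (c :: st.1, st.2)
  else if c ∈ ([']', ')', '}'] : List Char) then
    match st.1 with
    | [] => ([], "Wrong")
    | left :: rest =>
      if (c == ']' && left != '[') || (c == ')' && left != '(') || (c == '}' && left != '{') then
        (rest, "Wrong")
      else (rest, st.2)
  else st

theorem stepA_br (n : Int) (stack : List Char) (yn : String) (c : Char)
    (hb : c ∈ (['[', ']', '(', ')', '{', '}'] : List Char)) :
    pvStepA (n, stack, yn) c = (n + 1, pvStep2 (stack, yn) c) := by
  cases stack <;> simp only [pvStepA, pvStep2, if_pos hb] <;> split_ifs <;> simp_all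

theorem stepA_nbr (n : Int) (stack : List Char) (yn : String) (c : Char)
    (hb : c ∉ (['[', ']', '(', ')', '{', '}'] : List Char)) :
    pvStepA (n, stack, yn) c = (n, stack, yn) := by
  have h1 : c ∉ (['[', '(', '{'] : List Char) := by simp at hb ⊢; tauto
  have h2 : c ∉ ([']', ')', '}'] : List Char) := by simp at hb ⊢; tauto
  simp [pvStepA, hb, h1, h2]

theorem foldA_split : ∀ (l : List Char) (n : Int) (stack : List Char) (yn : String),
    l.foldl pvStepA (n, stack, yn)
      = (n + ((l.filter (fun c => decide (c ∈ pvBRACKETS))).length : Int),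
         (l.filter (fun c => decide (c ∈ pvBRACKETS))).foldl pvStep2 (stack, yn)) := by
  intro l
  induction l with
  | nil => intro n stack yn; simp
  | cons c t ih =>
    intro n stack yn
    by_cases hb : c ∈ (['[', ']', '(', ')', '{', '}'] : List Char)
    · have hb' : decide (c ∈ pvBRACKETS) = true := by simpa [pvBRACKETS] using hb
      simp only [List.foldl_cons, List.filter_cons, hb', if_pos, stepA_br n stack yn c hb]
      rcases hs : pvStep2 (stack, yn) c with ⟨stack', yn'⟩
      rw [ih (n + 1) stack' yn']
      simp
      omega
    · have hb' : decide (c ∈ pvBRACKETS) = false := by simpa [pvBRACKETS] using hb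
      simp only [List.foldl_cons, List.filter_cons, hb', stepA_nbr n stack yn c hb]
      simpa using ih n stack yn

-- processing a matched pair is the identity on the (stack, yn) machine
theorem pair_cancel (o c : Char)
    (h : (o = '(' ∧ c = ')') ∨ (o = '[' ∧ c = ']') ∨ (o = '{' ∧ c = '}')) (st : List Char × String) :
    pvStep2 (pvStep2 st o) c = st := by
  rcases st with ⟨stack, yn⟩
  rcases h with ⟨rfl, rfl⟩ | ⟨rfl, rfl⟩ | ⟨rfl, rfl⟩ <;> simp [pvStep2]

theorem foldl_pvRepl (a b : Char)
    (h : (a = '(' ∧ b = ')') ∨ (a = '[' ∧ b = ']') ∨ (a = '{' ∧ b = '}')) :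
    ∀ (l : List Char) (st : List Char × String),
      (pvRepl a b l).foldl pvStep2 st = l.foldl pvStep2 st := by
  intro l
  fun_induction pvRepl a b l with
  | case1 c d t hcd ih =>
    intro st
    obtain ⟨rfl, rfl⟩ : a = c ∧ b = d := by
      constructor <;> [exact eq_of_beq (by simp_all); exact eq_of_beq (by simp_all)]
    rw [ih st]
    simp [pair_cancel a b h st]
  | case2 c d t hcd ih => intro st; simp only [List.foldl_cons, ih]
  | case3 l hl => intro st; rfl

theorem foldl_stepRepl (s : List Char) (st : List Char × String) :
    (pvStepRepl s).foldl pvStep2 st = s.foldl pvStep2 st := by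
  unfold pvStepRepl
  rw [replace_pair_eq, replace_pair_eq, replace_pair_eq,
      foldl_pvRepl '{' '}' (by tauto), foldl_pvRepl '[' ']' (by tauto),
      foldl_pvRepl '(' ')' (by tauto)]

theorem foldl_reduceB (s : List Char) (st : List Char × String) :
    (pvReduceB s).foldl pvStep2 st = s.foldl pvStep2 st := by
  fun_induction pvReduceB s with
  | case1 s h => rfl
  | case2 s h ih => rw [ih, foldl_stepRepl]

theorem reduceB_fix (s : List Char) : pvStepRepl (pvReduceB s) = pvReduceB s := by
  fun_induction pvReduceB s with
  | case1 s h => exact h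
  | case2 s h ih => exact ih

theorem mem_pvRepl (a b : Char) (l : List Char) (x : Char) (hx : x ∈ pvRepl a b l) : x ∈ l := by
  fun_induction pvRepl a b l with
  | case1 c d t hcd ih => simp_all
  | case2 c d t hcd ih => simp_all; tauto
  | case3 l hl => exact hx

theorem mem_stepRepl (s : List Char) (x : Char) (hx : x ∈ pvStepRepl s) : x ∈ s := by
  unfold pvStepRepl at hx
  rw [replace_pair_eq, replace_pair_eq, replace_pair_eq] at hx
  exact mem_pvRepl _ _ _ _ (mem_pvRepl _ _ _ _ (mem_pvRepl _ _ _ _ hx))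

theorem mem_reduceB (s : List Char) (x : Char) (hx : x ∈ pvReduceB s) : x ∈ s := by
  fun_induction pvReduceB s with
  | case1 s h => exact hx
  | case2 s h ih => exact mem_stepRepl s x (ih hx)

-- no adjacent occurrence of the pair a b
def pvNoAdj (a b : Char) : List Char → Bool
  | c :: d :: t => !(a == c && b == d) && pvNoAdj a b (d :: t)
  | _ => true

theorem pvRepl_lt_of_adj (a b : Char) (l : List Char) (h : pvNoAdj a b l = false) :
    (pvRepl a b l).length < l.length := by
  fun_induction pvRepl a b l with
  | case1 c d t hcd ih =>
    have := pvRepl_length_le a b t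
    simp; omega
  | case2 c d t hcd ih =>
    have hcd' : (a == c && b == d) = false := by
      cases h1 : a == c <;> cases h2 : b == d <;> simp_all
    have ht : pvNoAdj a b (d :: t) = false := by
      simp only [pvNoAdj, hcd', Bool.not_false, Bool.true_and] at h
      exact h
    have := ih ht
    simp only [List.length_cons] at this ⊢
    omega
  | case3 l hl =>
    exfalso
    match l, hl with
    | [], _ => simp [pvNoAdj] at h
    | [c], _ => simp [pvNoAdj] at h
    | c :: d :: t, hl => exact hl c d t rfl

theorem noAdj_of_eq (a b : Char) (l : List Char) (h : pvRepl a b l = l) : pvNoAdj a b l = true := by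
  by_contra hn
  have := pvRepl_lt_of_adj a b l (by simpa using hn)
  rw [h] at this
  omega

theorem fix_noAdj (s : List Char) (h : pvStepRepl s = s) :
    pvNoAdj '(' ')' s = true ∧ pvNoAdj '[' ']' s = true ∧ pvNoAdj '{' '}' s = true := by
  have hs : pvRepl '{' '}' (pvRepl '[' ']' (pvRepl '(' ')' s)) = s := by
    unfold pvStepRepl at h
    rw [replace_pair_eq, replace_pair_eq, replace_pair_eq] at h
    exact h
  have l1 := pvRepl_length_le '(' ')' s
  have l2 := pvRepl_length_le '[' ']' (pvRepl '(' ')' s)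
  have l3 := pvRepl_length_le '{' '}' (pvRepl '[' ']' (pvRepl '(' ')' s))
  have hlen : s.length = (pvRepl '{' '}' (pvRepl '[' ']' (pvRepl '(' ')' s))).length := by rw [hs]
  rcases pvRepl_eq_or_lt '(' ')' s with h1 | h1
  · rw [h1] at hs hlen l2 l3
    rcases pvRepl_eq_or_lt '[' ']' s with h2 | h2
    · rw [h2] at hs hlen l3
      refine ⟨noAdj_of_eq _ _ _ h1, noAdj_of_eq _ _ _ h2, noAdj_of_eq _ _ _ hs⟩
    · omega
  · omega

theorem noAdj_append (a b : Char) : ∀ (u v : List Char), pvNoAdj a b (u ++ a :: b :: v) = false := by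
  intro u
  induction u with
  | nil => intro v; simp [pvNoAdj]
  | cons x u ih =>
    intro v
    rcases hu : u ++ a :: b :: v with _ | ⟨y, t⟩
    · simp at hu
    · have hthis : pvNoAdj a b (u ++ a :: b :: v) = false := ih v
      rw [hu] at hthis
      show pvNoAdj a b (x :: (u ++ a :: b :: v)) = false
      rw [hu]
      simp [pvNoAdj, hthis]

-- "Wrong" is sticky
theorem step2_snd (st : List Char × String) (c : Char) :
    (pvStep2 st c).2 = st.2 ∨ (pvStep2 st c).2 = "Wrong" := by
  rcases st with ⟨stack, yn⟩
  cases stack <;> simp [pvStep2] <;> split_ifs <;> simp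

theorem wrong_sticky : ∀ (l : List Char) (st : List Char × String), st.2 = "Wrong" →
    (l.foldl pvStep2 st).2 = "Wrong" := by
  intro l
  induction l with
  | nil => intro st h; exact h
  | cons c t ih =>
    intro st h
    rcases step2_snd st c with h' | h' <;>
      exact ih (pvStep2 st c) (by rw [h']; try exact h)

theorem yn_range : ∀ (l : List Char) (st : List Char × String),
    (l.foldl pvStep2 st).2 = st.2 ∨ (l.foldl pvStep2 st).2 = "Wrong" := by
  intro l
  induction l with
  | nil => intro st; left; rfl
  | cons c t ih =>
    intro st
    rcases ih (pvStep2 st c) with h | h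
    · rcases step2_snd st c with h' | h' <;> simp only [List.foldl_cons] <;> rw [h, h'] <;> tauto
    · right; simpa using h
  -- done

theorem open_run : ∀ (l : List Char) (stack : List Char) (yn : String),
    (∀ c ∈ l, c ∈ (['[', '(', '{'] : List Char)) →
    l.foldl pvStep2 (stack, yn) = (l.reverse ++ stack, yn) := by
  intro l
  induction l with
  | nil => intro stack yn _; simp
  | cons c t ih =>
    intro stack yn h
    have hc : c ∈ (['[', '(', '{'] : List Char) := h c (by simp)
    have hstep : pvStep2 (stack, yn) c = (c :: stack, yn) := by simp [pvStep2, hc]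
    simp only [List.foldl_cons, hstep]
    rw [ih (c :: stack) yn (fun x hx => h x (by simp [hx]))]
    simp

theorem dropWhile_head_false {p : Char → Bool} : ∀ (l : List Char) (c : Char) (t : List Char),
    l.dropWhile p = c :: t → p c = false := by
  intro l
  induction l with
  | nil => intro c t h; simp [List.dropWhile] at h
  | cons x xs ih =>
    intro c t h
    rw [List.dropWhile_cons] at h
    by_cases hx : p x = true
    · rw [if_pos hx] at h; exact ih c t h
    · rw [if_neg hx] at h
      cases h
      simpa using hx

-- a nonempty bracket-only fixpoint makes the machine reject
theorem fix_wrong (s : List Char) (hbr : ∀ c ∈ s, c ∈ pvBRACKETS)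
    (hne : s ≠ []) (hfix : pvStepRepl s = s) :
    s.foldl pvStep2 ([], "OK") ≠ (([] : List Char), "OK") := by
  obtain ⟨na1, na2, na3⟩ := fix_noAdj s hfix
  set p : Char → Bool := fun c => decide (c ∈ (['[', '(', '{'] : List Char)) with hp
  have hsplit : s.takeWhile p ++ s.dropWhile p = s := List.takeWhile_append_dropWhile
  have hop : ∀ c ∈ s.takeWhile p, c ∈ (['[', '(', '{'] : List Char) := by
    intro c hc
    have := List.mem_takeWhile_imp hc
    simpa [hp] using this
  rcases hrest : s.dropWhile p with _ | ⟨c, t⟩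
  · -- all openers: stack nonempty
    have hall : s.takeWhile p = s := by
      conv_rhs => rw [← hsplit, hrest]
      simp
    rw [← hall]
    rw [open_run (s.takeWhile p) [] "OK" hop]
    intro h
    have : s.takeWhile p = [] := by
      have := congrArg Prod.fst h
      simpa using this
    rw [hall] at this
    exact hne this
  · -- first non-opener c: a closer; the machine turns Wrong there
    have hcnop : p c = false := dropWhile_head_false s c t hrest
    have hcs : c ∈ s := by rw [← hsplit, hrest]; simp
    have hcbr : c ∈ pvBRACKETS := hbr c hcs
    have hcclose : c ∈ ([']', ')', '}'] : List Char) := by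
      simp [pvBRACKETS] at hcbr
      simp [hp] at hcnop
      simp
      tauto
    have hfold : s.foldl pvStep2 ([], "OK")
        = (c :: t).foldl pvStep2 ((s.takeWhile p).reverse ++ [], "OK") := by
      conv_lhs => rw [← hsplit, hrest]
      rw [List.foldl_append, open_run (s.takeWhile p) [] "OK" hop]
    rcases heq : (s.takeWhile p).reverse with _ | ⟨o, u⟩
    · -- empty stack, closer: Wrong immediately
      have hcnopen : c ∉ (['[', '(', '{'] : List Char) := by simpa [hp] using hcnop
      have hstep : pvStep2 (([] : List Char), "OK") c = ([], "Wrong") := by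
        simp [pvStep2, hcnopen, hcclose]
      intro habs
      have : (s.foldl pvStep2 ([], "OK")).2 = "Wrong" := by
        rw [hfold, heq]
        simp only [List.foldl_cons, List.nil_append, hstep]
        exact wrong_sticky t ([], "Wrong") rfl
      rw [habs] at this
      simp at this
    · -- stack top o (an opener), closer c: a match would be an adjacent pair, excluded
      have hou : o ∈ s.takeWhile p := by
        have : o ∈ (s.takeWhile p).reverse := by rw [heq]; simp
        simpa using this
      have hoopen : o ∈ (['[', '(', '{'] : List Char) := hop o hou
      have hcnopen : c ∉ (['[', '(', '{'] : List Char) := by simpa [hp] using hcnop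
      have hnomatch : ¬((o = '(' ∧ c = ')') ∨ (o = '[' ∧ c = ']') ∨ (o = '{' ∧ c = '}')) := by
        rintro (⟨rfl, rfl⟩ | ⟨rfl, rfl⟩ | ⟨rfl, rfl⟩)
        · have : s = (u.reverse) ++ '(' :: ')' :: t := by
            rw [← hsplit, hrest]
            have : s.takeWhile p = u.reverse ++ ['('] := by
              have := congrArg List.reverse heq
              simpa using this
            rw [this]
            simp
          rw [this, noAdj_append] at na1
          simp at na1
        · have : s = (u.reverse) ++ '[' :: ']' :: t := by
            rw [← hsplit, hrest]
            have : s.takeWhile p = u.reverse ++ ['['] := by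
              have := congrArg List.reverse heq
              simpa using this
            rw [this]
            simp
          rw [this, noAdj_append] at na2
          simp at na2
        · have : s = (u.reverse) ++ '{' :: '}' :: t := by
            rw [← hsplit, hrest]
            have : s.takeWhile p = u.reverse ++ ['{'] := by
              have := congrArg List.reverse heq
              simpa using this
            rw [this]
            simp
          rw [this, noAdj_append] at na3
          simp at na3
      have hcond : ((c == ']' && o != '[') || (c == ')' && o != '(') || (c == '}' && o != '{')) = true := by
        simp at hcclose hoopen
        rcases hcclose with rfl | rfl | rfl <;> rcases hoopen with rfl | rfl | rfl <;> simp_all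
      have hstep : pvStep2 ((o :: u : List Char), "OK") c = (u, "Wrong") := by
        simp [pvStep2, hcnopen, hcclose, hcond]
      intro habs
      have : (s.foldl pvStep2 ([], "OK")).2 = "Wrong" := by
        rw [hfold, heq]
        simp only [List.foldl_cons, List.append_nil, hstep]
        exact wrong_sticky t (u, "Wrong") rfl
      rw [habs] at this
      simp at this

-- ===== VERDICT (by name: the statement is the Claim_ definition above) =====
theorem MyFunction_02_spec : Claim_equal_MyFunction_02 := by
  intro fomula _
  unfold Spec_MyFunction_02
  simp only [MyFunction_02, MyFunction_02_alt]
  rw [foldA_split]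
  generalize hfl : List.filter (fun c => decide (c ∈ pvBRACKETS)) fomula.toList = fl
  have hbrfl : ∀ c ∈ fl, c ∈ pvBRACKETS := by
    intro c hc
    rw [← hfl] at hc
    simpa using List.of_mem_filter hc
  rcases hr : pvReduceB fl with _ | ⟨x, xs⟩
  · have hmach : fl.foldl pvStep2 (([], "OK") : List Char × String) = ([], "OK") := by
      rw [← foldl_reduceB fl ([], "OK"), hr]
      rfl
    rw [hmach]
    simp
  · have hne : pvReduceB fl ≠ [] := by rw [hr]; simp
    have hbr : ∀ c ∈ pvReduceB fl, c ∈ pvBRACKETS := fun c hc => hbrfl c (mem_reduceB fl c hc)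
    have hmach := fix_wrong (pvReduceB fl) hbr hne (reduceB_fix fl)
    rw [foldl_reduceB fl ([], "OK")] at hmach
    rcases hm : fl.foldl pvStep2 (([], "OK") : List Char × String) with ⟨S, Y⟩
    rw [hm] at hmach
    have hyn : (if S.length ≠ 0 then "Wrong" else Y) = "Wrong" := by
      rcases hS : S with _ | _
      · simp only [List.length_nil, ne_eq, not_true_eq_false, ite_false]
        rcases yn_range fl (([], "OK") : List Char × String) with hY | hY <;> rw [hm] at hY
        · exfalso; apply hmach; rw [hS]; rw [hS] at hY; simp at hY; simp [hY]
        · simpa using hY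
      · simp
    cases S with
    | nil =>
      have hY : Y = "Wrong" := by simpa using hyn
      simp [hY]
    | cons a l => simp
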